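-- pv_equiv track=rewrite | github.com/Barebore/Algorithms | Yandex_Praktikum/Algosiki/sprint1/task1.py | distance_houses
-- ===== SOURCE A (Python) =====
-- def distance_houses(length_street, number_home):
--     """
--     Функция возвращает список расстояний до пустых участков,
--     где каждый элемент это учасок: 0 - пустой участкок,
--     другие числа означают, что участок занятый и указывают
--     на расстояние до ближайшего пустого участка.
--
--     >>> distance_houses(5, [0, 1, 4, 9, 0])
--     [0, 1, 2, 1, 0]
--
--     >>> distance_houses(6, [0, 8, 9, 4, 8, 20])
--     [0, 1, 2, 3, 4, 5]
--     """
--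
--     l_out = []
--     count_not_null = 0
--     flag = 0
--     for i, value in enumerate(number_home):
--         if value != 0:
--             count_not_null += 1
--             l_out.append(count_not_null)
--         elif value == 0:
--             l_out.append(value)
--             try:
--                 if flag == 1:
--                     l_out[i - (count_not_null // 2):i] = (
--                         list(range(count_not_null // 2, 0, -1)))
--                 else:
--                     l_out[:i] = list(range(count_not_null, 0, -1))
--                 count_not_null = 0
--                 flag = 1
--             except:
--                 pass
--     return l_out
-- ===== SOURCE B (Python) =====
-- def distance_houses(length_street, number_home):
--     # Run-length decomposition: split the street on empty lots (zeros) and emit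
--     # each run's distance pattern in closed form (no in-place slice surgery).
--     parts = []          # lengths of occupied runs, each ending at a zero
--     cur = 0             # length of the current (still open) occupied run
--     for v in number_home:
--         if v == 0:
--             parts.append(cur)
--             cur = 0
--         else:
--             cur += 1
--     if not parts:                       # no empty lot at all
--         return list(range(1, cur + 1))
--     out = list(range(parts[0], 0, -1)) + [0]
--     for k in parts[1:]:
--         half = k // 2
--         out += list(range(1, k - half + 1)) + list(range(half, 0, -1)) + [0]
--     out += list(range(1, cur + 1))      # trailing occupied run after the last zero
--     return out
-- ===== Notes on version B (the rewrite author's own statement) =====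
-- stated objective: simpler
-- what changed: Replaces A's flag/counter loop with in-place slice-assignment surgery by a run-length decomposition: split the street on zeros, then emit each occupied run's distance pattern (descending prefix, mirrored interior runs, ascending tail) in closed form.
import Mathlib
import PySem

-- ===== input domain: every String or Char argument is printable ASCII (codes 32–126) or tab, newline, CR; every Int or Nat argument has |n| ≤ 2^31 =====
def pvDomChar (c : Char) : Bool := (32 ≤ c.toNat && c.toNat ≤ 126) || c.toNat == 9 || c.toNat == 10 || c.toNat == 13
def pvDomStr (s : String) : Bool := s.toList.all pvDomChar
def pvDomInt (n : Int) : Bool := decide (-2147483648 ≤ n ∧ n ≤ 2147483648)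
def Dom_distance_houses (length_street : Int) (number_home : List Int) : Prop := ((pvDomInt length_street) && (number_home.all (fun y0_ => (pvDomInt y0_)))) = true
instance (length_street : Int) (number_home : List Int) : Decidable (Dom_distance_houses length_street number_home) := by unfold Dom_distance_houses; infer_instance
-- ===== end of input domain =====

-- B replaces A's flag/counter loop with slice-assignment surgery by a run-length
-- decomposition emitting each run's distance pattern in closed form (objective: simpler).

-- ===== PORT A =====
-- Python slice assignment l[a:b] = new (exact here: every call in the loop has 0 ≤ a ≤ b ≤ len l)
def pvReplaceSlice (xs : List Int) (a b : Int) (new : List Int) : List Int :=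
  PySem.List.slice xs none (some a) ++ new ++ PySem.List.slice xs (some b) none

-- literal port of A: enumerate loop with state (l_out, count_not_null, flag).
-- The try/except is dead code: the slice assignments cannot raise.
def distance_houses (length_street : Int) (number_home : List Int) : List Int :=
  ((PySem.List.enumerate number_home 0).foldl
    (fun (st : List Int × Int × Int) (iv : Int × Int) =>
      let l_out := st.1; let count := st.2.1; let flag := st.2.2
      let i := iv.1; let value := iv.2
      if value ≠ 0 then
        (l_out ++ [count + 1], count + 1, flag)
      else
        let l1 := l_out ++ [value]
        if flag = 1 then
          (pvReplaceSlice l1 (i - PySem.Int.floordiv count 2) i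
            (PySem.List.pyRange (PySem.Int.floordiv count 2) 0 (-1)), 0, 1)
        else
          (pvReplaceSlice l1 0 i (PySem.List.pyRange count 0 (-1)), 0, 1))
    ([], 0, 0)).1

-- ===== PORT B =====
def distance_houses_alt (length_street : Int) (number_home : List Int) : List Int :=
  let pc := number_home.foldl
    (fun (st : List Int × Int) v => if v = 0 then (st.1 ++ [st.2], 0) else (st.1, st.2 + 1))
    ([], 0)
  match pc.1 with
  | [] => PySem.List.pyRange 1 (pc.2 + 1) 1
  | p0 :: rest =>
    (rest.foldl
      (fun out k =>
        out ++ PySem.List.pyRange 1 (k - PySem.Int.floordiv k 2 + 1) 1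
            ++ PySem.List.pyRange (PySem.Int.floordiv k 2) 0 (-1) ++ [0])
      (PySem.List.pyRange p0 0 (-1) ++ [0]))
    ++ PySem.List.pyRange 1 (pc.2 + 1) 1

-- ===== PRECONDITION & SPEC =====
def Spec_distance_houses (length_street : Int) (number_home : List Int) (out : List Int) : Prop := out = distance_houses_alt length_street number_home
instance (length_street : Int) (number_home : List Int) (out : List Int) : Decidable (Spec_distance_houses length_street number_home out) := by unfold Spec_distance_houses; infer_instance

-- ===== CLAIM (what is proved, stated in full; the proofs are below) =====
def Claim_equal_distance_houses : Prop := ∀ (length_street : Int) (number_home : List Int), Dom_distance_houses length_street number_home → Spec_distance_houses length_street number_home (distance_houses length_street number_home)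

-- ===== LEMMAS AND PROOFS =====

-- A's loop body and B's first loop body, named for the invariant proof
def pvStepA (st : List Int × Int × Int) (iv : Int × Int) : List Int × Int × Int :=
  let l_out := st.1; let count := st.2.1; let flag := st.2.2
  let i := iv.1; let value := iv.2
  if value ≠ 0 then
    (l_out ++ [count + 1], count + 1, flag)
  else
    let l1 := l_out ++ [value]
    if flag = 1 then
      (pvReplaceSlice l1 (i - PySem.Int.floordiv count 2) i
        (PySem.List.pyRange (PySem.Int.floordiv count 2) 0 (-1)), 0, 1)
    else
      (pvReplaceSlice l1 0 i (PySem.List.pyRange count 0 (-1)), 0, 1)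

def pvStepB (st : List Int × Int) (v : Int) : List Int × Int :=
  if v = 0 then (st.1 ++ [st.2], 0) else (st.1, st.2 + 1)

-- closed-form pattern of one interior occupied run of length k
def pvSeg (k : Int) : List Int :=
  PySem.List.pyRange 1 (k - PySem.Int.floordiv k 2 + 1) 1
    ++ PySem.List.pyRange (PySem.Int.floordiv k 2) 0 (-1) ++ [0]

-- output for the part of the street up to (and including) the last zero
def pvResolved : List Int → List Int
  | [] => []
  | p0 :: rest => PySem.List.pyRange p0 0 (-1) ++ [0] ++ rest.flatMap pvSeg

def pvRender (parts : List Int) (cur : Int) : List Int :=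
  pvResolved parts ++ PySem.List.pyRange 1 (cur + 1) 1

def pvFlag (parts : List Int) : Int := if parts = [] then 0 else 1


lemma pvFoldSeg (rest init : List Int) :
    rest.foldl
        (fun out k =>
          out ++ PySem.List.pyRange 1 (k - PySem.Int.floordiv k 2 + 1) 1
              ++ PySem.List.pyRange (PySem.Int.floordiv k 2) 0 (-1) ++ [0]) init
      = init ++ rest.flatMap pvSeg := by
  induction rest generalizing init with
  | nil => simp
  | cons k t ih =>
    rw [List.foldl_cons, ih]
    simp only [pvSeg, List.flatMap_cons, List.append_assoc]

-- the ports are the named step functions folded / rendered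
lemma pvA_eq (ls : Int) (nh : List Int) :
    distance_houses ls nh = ((PySem.List.enumerate nh 0).foldl pvStepA ([], 0, 0)).1 := rfl

lemma pvB_eq (ls : Int) (nh : List Int) :
    distance_houses_alt ls nh =
      pvRender (nh.foldl pvStepB ([], 0)).1 (nh.foldl pvStepB ([], 0)).2 := by
  show (match (nh.foldl pvStepB ([], 0)).1 with
    | [] => PySem.List.pyRange 1 ((nh.foldl pvStepB ([], 0)).2 + 1) 1
    | p0 :: rest =>
      (rest.foldl
        (fun out k =>
          out ++ PySem.List.pyRange 1 (k - PySem.Int.floordiv k 2 + 1) 1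
              ++ PySem.List.pyRange (PySem.Int.floordiv k 2) 0 (-1) ++ [0])
        (PySem.List.pyRange p0 0 (-1) ++ [0]))
      ++ PySem.List.pyRange 1 ((nh.foldl pvStepB ([], 0)).2 + 1) 1) = _
  cases h : (nh.foldl pvStepB ([], 0)).1 with
  | nil => simp [pvRender, pvResolved]
  | cons p0 rest =>
    simp only [pvRender, pvResolved]
    rw [pvFoldSeg]

lemma pvLen_render (parts : List Int) (cur : Int) :
    (pvRender parts cur).length = (pvResolved parts).length + cur.toNat := by
  simp [pvRender, PySem.List.length_pyRange_one]

lemma pvLen_seg (cur : Int) (hcur : 0 ≤ cur) : (pvSeg cur).length = cur.toNat + 1 := by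
  have h2 : PySem.Int.floordiv cur 2 = cur / 2 :=
    PySem.Int.floordiv_eq_ediv_of_pos (by norm_num)
  simp [pvSeg, PySem.List.length_pyRange_one, PySem.List.length_pyRange_neg_one]
  omega

lemma pvLen_resolved_snoc (parts : List Int) (cur : Int) (hcur : 0 ≤ cur) :
    (pvResolved (parts ++ [cur])).length = (pvResolved parts).length + cur.toNat + 1 := by
  cases parts with
  | nil => simp [pvResolved, PySem.List.length_pyRange_neg_one]
  | cons p0 rest => simp [pvResolved, pvLen_seg cur hcur]; omega

-- Python l[0:i] = new when i = len(l) - 1 and l ends in a 0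
lemma pvReplace_zero_len (xs new : List Int) :
    pvReplaceSlice (xs ++ [0]) 0 ((xs.length : Int)) new = new ++ [0] := by
  have h0 : PySem.List.slice (xs ++ [(0:Int)]) none (some 0) = [] := by
    rw [PySem.List.slice_to (xs ++ [0]) (show (0:Int) ≤ 0 from le_rfl)]; simp
  have h1 : PySem.List.slice (xs ++ [(0:Int)]) (some ((xs.length : Nat) : Int)) none = [0] := by
    rw [PySem.List.slice_from_natCast]
    exact List.drop_left
  simp [pvReplaceSlice, h0, h1]

-- Python l[a:i] = new for len R ≤ a ≤ i = len(l) - 1, l = R ++ T ++ [0]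
lemma pvReplace_mid (R T new : List Int) (m : Nat) (hm : m ≤ T.length) :
    pvReplaceSlice (R ++ (T ++ [0])) (((R.length + m : Nat) : Int)) (((R ++ (T ++ [0])).length - 1 : Nat) : Int) new
      = R ++ T.take m ++ new ++ [0] := by
  have hb : ((R ++ (T ++ [0])).length - 1 : Nat) = (R ++ T).length := by simp
  have h0 : PySem.List.slice (R ++ (T ++ [0])) none (some ((R.length + m : Nat) : Int))
      = R ++ T.take m := by
    rw [PySem.List.slice_to_natCast, List.take_length_add_append,
        List.take_append_of_le_length hm]
  have h1 : PySem.List.slice (R ++ (T ++ [0])) (some (((R ++ (T ++ [0])).length - 1 : Nat) : Int)) none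
      = [0] := by
    rw [PySem.List.slice_from_natCast, hb, ← List.append_assoc]
    exact List.drop_left
  unfold pvReplaceSlice
  rw [h0, h1]

-- occupied lot: append the next count to both the rendered list and the trailing range
lemma pvStepA_nonzero (parts : List Int) (cur i v : Int) (hv : v ≠ 0) (hcur : 0 ≤ cur) :
    pvStepA (pvRender parts cur, cur, pvFlag parts) (i, v)
      = (pvRender parts (cur + 1), cur + 1, pvFlag parts) := by
  have h := PySem.List.pyRange_one_succ_right (a := 1) (b := cur + 1) (by omega)
  simp only [pvStepA, pvRender, if_pos hv]
  rw [h]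
  simp [List.append_assoc]

-- empty lot: the slice-assignment surgery closes the current run into its final pattern
lemma pvStepA_zero (parts : List Int) (cur : Int) (hcur : 0 ≤ cur) :
    pvStepA (pvRender parts cur, cur, pvFlag parts) (((pvRender parts cur).length : Int), 0)
      = (pvRender (parts ++ [cur]) 0, 0, pvFlag (parts ++ [cur])) := by
  have h2 : PySem.Int.floordiv cur 2 = cur / 2 :=
    PySem.Int.floordiv_eq_ediv_of_pos (by norm_num)
  have hT : (PySem.List.pyRange 1 (cur + 1) 1).length = cur.toNat := by
    rw [PySem.List.length_pyRange_one]; omega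
  cases parts with
  | nil =>
    simp only [pvStepA, pvFlag, pvRender, pvResolved, List.nil_append,
      if_neg (by norm_num : ¬ ((0:Int) ≠ 0))]
    rw [pvReplace_zero_len]
    simp
  | cons p0 rest =>
    set R := pvResolved (p0 :: rest) with hR
    set T := PySem.List.pyRange 1 (cur + 1) 1 with hTdef
    have hflag : pvFlag (p0 :: rest) = 1 := by simp [pvFlag]
    simp only [pvStepA, pvRender, hflag, if_neg (by norm_num : ¬ ((0:Int) ≠ 0)), h2]
    set m : Nat := (cur - cur / 2).toNat with hm
    have ha : ((R ++ T).length : Int) - cur / 2 = ((R.length + m : Nat) : Int) := by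
      rw [List.length_append, hT]
      omega
    have hb : ((R ++ T).length : Int) = (((R ++ (T ++ [0])).length - 1 : Nat) : Int) := by
      simp only [List.length_append, List.length_cons, List.length_nil]
      omega
    have htake : T.take m = PySem.List.pyRange 1 (cur - cur / 2 + 1) 1 := by
      rw [hTdef, PySem.List.pyRange_one_append 1 (cur - cur / 2 + 1) (cur + 1)
        (by omega) (by omega)]
      refine List.take_left' ?_
      rw [PySem.List.length_pyRange_one]; omega
    rw [List.append_assoc, ha, hb, pvReplace_mid R T _ m (by rw [hTdef, hT]; omega), htake]
    have hres : pvResolved (p0 :: (rest ++ [cur])) = R ++ pvSeg cur := by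
      rw [hR]; simp [pvResolved, List.flatMap_append, pvSeg, List.append_assoc]
    simp [hres, pvSeg, pvFlag, List.append_assoc]

lemma pvInv (l : List Int) : ∀ (parts : List Int) (cur : Int), 0 ≤ cur →
    (PySem.List.enumerate l ((pvRender parts cur).length : Int)).foldl pvStepA
        (pvRender parts cur, cur, pvFlag parts)
      = (pvRender (l.foldl pvStepB (parts, cur)).1 (l.foldl pvStepB (parts, cur)).2,
         (l.foldl pvStepB (parts, cur)).2, pvFlag (l.foldl pvStepB (parts, cur)).1) := by
  induction l with
  | nil => intro parts cur hcur; simp [PySem.List.enumerate_nil]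
  | cons v t ih =>
    intro parts cur hcur
    rw [PySem.List.enumerate_cons]
    by_cases hv : v = 0
    · subst hv
      simp only [List.foldl_cons, pvStepA_zero parts cur hcur]
      have hs : ((pvRender parts cur).length : Int) + 1
          = ((pvRender (parts ++ [cur]) 0).length : Int) := by
        rw [pvLen_render parts cur, pvLen_render (parts ++ [cur]) 0,
            pvLen_resolved_snoc parts cur hcur]
        push_cast; omega
      rw [hs, ih (parts ++ [cur]) 0 le_rfl]
      simp [pvStepB]
    · simp only [List.foldl_cons, pvStepA_nonzero parts cur _ v hv hcur]
      have hs : ((pvRender parts cur).length : Int) + 1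
          = ((pvRender parts (cur + 1)).length : Int) := by
        rw [pvLen_render parts cur, pvLen_render parts (cur + 1)]
        push_cast; omega
      rw [hs, ih parts (cur + 1) (by omega)]
      simp [pvStepB, hv]

-- ===== VERDICT (by name: the statement is the Claim_ definition above) =====
theorem distance_houses_spec : Claim_equal_distance_houses := by
  intro ls nh _
  show distance_houses ls nh = distance_houses_alt ls nh
  rw [pvA_eq, pvB_eq]
  have h := pvInv nh [] 0 le_rfl
  have e1 : pvRender [] 0 = [] := by decide
  have e2 : pvFlag [] = (0 : Int) := rfl
  rw [e1, e2] at h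
  simp only [List.length_nil, Nat.cast_zero] at h
  rw [h]
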